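-- pv_equiv track=rewrite | github.com/liskos/jakov | ege16/81.py | f
-- ===== SOURCE A (Python) =====
-- def f(n):
--     if n == 6:
--         return 100000000
--     if n > 1000000:
--             return 1000000
--     if n <= 5:
--         return n
--     if n > 5 and n % 5 == 0:
--         return n + f(n//5+1)
--     if n > 5 and n % 5 != 0:
--         return n+f(n+6)
-- ===== SOURCE B (Python) =====
-- def f(n):
--     if n == 6:
--         return 100000000
--     if n > 1000000:
--         return 1000000
--     if n <= 5:
--         return n
--     total = 0
--     while True:
--         if n == 6:
--             return total + 100000000
--         if n <= 5:
--             return total + n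
--         r = n % 5
--         if r == 0:
--             total += n
--             n = n // 5 + 1
--         else:
--             k = 5 - r
--             m = n + 6 * k
--             if m > 1000000:
--                 j = (1000000 - n) // 6 + 1
--                 return total + j * n + 3 * j * (j - 1) + 1000000
--             total += k * n + 3 * k * (k - 1)
--             n = m
-- ===== Notes on version B (the rewrite author's own statement) =====
-- stated objective: alternative
-- what changed: Replaces the step-by-step recursion by a loop that collapses each maximal run of +6 steps into one closed-form arithmetic-series update (k*n+3k(k-1)), jumping straight to the next multiple of 5, with a direct formula for the overshoot-past-1000000 case.
import Mathlib
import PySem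

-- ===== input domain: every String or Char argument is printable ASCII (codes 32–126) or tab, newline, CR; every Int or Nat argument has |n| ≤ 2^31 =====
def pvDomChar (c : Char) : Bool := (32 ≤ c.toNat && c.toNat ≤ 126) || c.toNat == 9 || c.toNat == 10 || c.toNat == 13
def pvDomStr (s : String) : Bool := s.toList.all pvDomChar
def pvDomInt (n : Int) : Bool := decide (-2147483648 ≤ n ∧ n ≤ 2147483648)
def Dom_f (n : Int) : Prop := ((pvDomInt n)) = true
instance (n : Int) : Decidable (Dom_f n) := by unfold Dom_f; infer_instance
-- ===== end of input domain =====

-- B replaces A's one-step-at-a-time recursion by a loop that collapses each maximal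
-- run of +6 steps into a single closed-form arithmetic-series update; objective: alternative, not faster.
-- Both ports carry a fuel parameter solely to make the same computation total; fuel 1000
-- is never exhausted on the inputs the claim covers (the proof shows the chains are short).

-- ===== PORT A =====
-- literal transliteration of A's recursion, guarded by fuel
def fRec : Nat → Int → Int
  | 0, _ => 0
  | fuel + 1, n =>
    if n == 6 then 100000000
    else if n > 1000000 then 1000000
    else if n ≤ 5 then n
    else if 5 < n ∧ PySem.Int.mod n 5 = 0 then n + fRec fuel (PySem.Int.floordiv n 5 + 1)
    else n + fRec fuel (n + 6)

def f (n : Int) : Int := fRec 1000 n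

-- ===== PORT B =====
-- literal transliteration of B's while-loop (one iteration per closed-form run / division)
def fAltLoop : Nat → Int → Int → Int
  | 0, total, _ => total
  | fuel + 1, total, n =>
    if n == 6 then total + 100000000
    else if n ≤ 5 then total + n
    else
      let r := PySem.Int.mod n 5
      if r = 0 then fAltLoop fuel (total + n) (PySem.Int.floordiv n 5 + 1)
      else
        let k := 5 - r
        let m := n + 6 * k
        if m > 1000000 then
          let j := PySem.Int.floordiv (1000000 - n) 6 + 1
          total + j * n + 3 * j * (j - 1) + 1000000
        else fAltLoop fuel (total + k * n + 3 * k * (k - 1)) m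

def f_alt (n : Int) : Int :=
  if n == 6 then 100000000
  else if n > 1000000 then 1000000
  else if n ≤ 5 then n
  else fAltLoop 1000 0 n

-- ===== PRECONDITION & SPEC =====
def Spec_f (n : Int) (out : Int) : Prop := out = f_alt n
instance (n : Int) (out : Int) : Decidable (Spec_f n out) := by unfold Spec_f; infer_instance

-- ===== CLAIM (what is proved, stated in full; the proofs are below) =====
def Claim_equal_f : Prop := ∀ (n : Int), Dom_f n → Spec_f n (f n)

-- ===== LEMMAS AND PROOFS =====

theorem mod5_eq (n : Int) : PySem.Int.mod n 5 = n % 5 :=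
  PySem.Int.mod_eq_emod_of_pos (by norm_num)

theorem div6_eq (n : Int) : PySem.Int.floordiv n 6 = n / 6 :=
  PySem.Int.floordiv_eq_ediv_of_pos (by norm_num)

-- head / step lemmas for A's port
theorem fRec_six (fuel fuel' : Nat) (hf : fuel = fuel' + 1) : fRec fuel 6 = 100000000 := by
  subst hf; simp [fRec]

theorem fRec_small (fuel fuel' : Nat) (hf : fuel = fuel' + 1) (n : Int) (h : n ≤ 5) :
    fRec fuel n = n := by
  subst hf
  have h6 : (n == 6) = false := by simp; omega
  simp [fRec, h6, h]
  omega

theorem fRec_big (fuel fuel' : Nat) (hf : fuel = fuel' + 1) (n : Int) (h : 1000000 < n) :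
    fRec fuel n = 1000000 := by
  subst hf
  have h6 : (n == 6) = false := by simp; omega
  simp [fRec, h6, h]

theorem fRec_step_div (fuel fuel' : Nat) (hf : fuel = fuel' + 1) (n : Int)
    (h6 : n ≠ 6) (hb : n ≤ 1000000) (h5 : 5 < n) (hm : n % 5 = 0) :
    fRec fuel n = n + fRec fuel' (n / 5 + 1) := by
  subst hf
  have h6' : (n == 6) = false := by simp [h6]
  simp [fRec, h6', hm, h5]
  omega

theorem fRec_step_add (fuel fuel' : Nat) (hf : fuel = fuel' + 1) (n : Int)
    (h6 : n ≠ 6) (hb : n ≤ 1000000) (h5 : 5 < n) (hm : n % 5 ≠ 0) :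
    fRec fuel n = n + fRec fuel' (n + 6) := by
  subst hf
  have h6' : (n == 6) = false := by simp [h6]
  simp [fRec, h6', hm, h5]
  omega

-- head / step lemmas for B's port
theorem fAlt_six (fuel fuel' : Nat) (hf : fuel = fuel' + 1) (total : Int) :
    fAltLoop fuel total 6 = total + 100000000 := by
  subst hf; simp [fAltLoop]

theorem fAlt_small (fuel fuel' : Nat) (hf : fuel = fuel' + 1) (total n : Int) (h : n ≤ 5) :
    fAltLoop fuel total n = total + n := by
  subst hf
  have h6 : (n == 6) = false := by simp; omega
  simp [fAltLoop, h6, h]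

theorem fAlt_step_div (fuel fuel' : Nat) (hf : fuel = fuel' + 1) (total n : Int)
    (h6 : n ≠ 6) (h5 : 5 < n) (hm : n % 5 = 0) :
    fAltLoop fuel total n = fAltLoop fuel' (total + n) (n / 5 + 1) := by
  subst hf
  have h6' : (n == 6) = false := by simp [h6]
  simp [fAltLoop, h6', hm]
  omega

theorem fAlt_step_run (fuel fuel' : Nat) (hf : fuel = fuel' + 1) (total n : Int)
    (h6 : n ≠ 6) (h5 : 5 < n) (hm : n % 5 ≠ 0) (hin : n + 6 * (5 - n % 5) ≤ 1000000) :
    fAltLoop fuel total n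
      = fAltLoop fuel' (total + (5 - n % 5) * n + 3 * (5 - n % 5) * (5 - n % 5 - 1)) (n + 6 * (5 - n % 5)) := by
  subst hf
  have h6' : (n == 6) = false := by simp [h6]
  have h5' : ¬ n ≤ 5 := by omega
  have hin' : ¬ n + 6 * (5 - n % 5) > 1000000 := by omega
  simp only [fAltLoop, h6', Bool.false_eq_true, if_false, if_neg h5', mod5_eq, if_neg hm,
    if_neg hin']

theorem fAlt_overshoot (fuel fuel' : Nat) (hf : fuel = fuel' + 1) (total n : Int)
    (h6 : n ≠ 6) (h5 : 5 < n) (hm : n % 5 ≠ 0) (hout : n + 6 * (5 - n % 5) > 1000000) :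
    fAltLoop fuel total n
      = total + ((1000000 - n) / 6 + 1) * n + 3 * ((1000000 - n) / 6 + 1) * ((1000000 - n) / 6 + 1 - 1) + 1000000 := by
  subst hf
  have h6' : (n == 6) = false := by simp [h6]
  have h5' : ¬ n ≤ 5 := by omega
  simp only [fAltLoop, h6', Bool.false_eq_true, if_false, if_neg h5', mod5_eq, if_neg hm,
    if_pos hout, div6_eq]

-- the core correspondence: on every loop head n ≤ 5^d + 7 (and ≤ 1000000), with enough fuel,
-- B's loop accumulates exactly what A's recursion sums
theorem loop_eq_rec (d : Nat) : ∀ (n total : Int) (f1 f2 : Nat),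
    n ≤ 5 ^ (d : ℕ) + 7 → n ≤ 1000000 → 2 * d + 3 ≤ f1 → 5 * d + 10 ≤ f2 →
    fAltLoop f1 total n = total + fRec f2 n := by
  induction d with
  | zero =>
    intro n total f1 f2 hb hm hf1 hf2
    by_cases h5 : n ≤ 5
    · rw [fAlt_small f1 (f1-1) (by omega) total n h5, fRec_small f2 (f2-1) (by omega) n h5]
    · have h8 : n ≤ 8 := by simpa using hb
      interval_cases n
      · rw [fAlt_six f1 (f1-1) (by omega), fRec_six f2 (f2-1) (by omega)]
      · -- n = 7 : run 7,13,19 then divide at 25 to 6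
        rw [fAlt_step_run f1 (f1-1) (by omega) total 7 (by norm_num) (by norm_num)
              (by norm_num) (by norm_num)]
        norm_num
        rw [fAlt_step_div (f1-1) (f1-2) (by omega) _ 25 (by norm_num) (by norm_num)
              (by norm_num)]
        norm_num
        rw [fAlt_six (f1-2) (f1-3) (by omega)]
        rw [fRec_step_add f2 (f2-1) (by omega) 7 (by norm_num) (by norm_num) (by norm_num)
              (by norm_num)]
        norm_num
        rw [fRec_step_add (f2-1) (f2-2) (by omega) 13 (by norm_num) (by norm_num) (by norm_num)
              (by norm_num)]
        norm_num
        rw [fRec_step_add (f2-2) (f2-3) (by omega) 19 (by norm_num) (by norm_num) (by norm_num)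
              (by norm_num)]
        norm_num
        rw [fRec_step_div (f2-3) (f2-4) (by omega) 25 (by norm_num) (by norm_num) (by norm_num)
              (by norm_num)]
        norm_num
        rw [fRec_six (f2-4) (f2-5) (by omega)]
        ring
      · -- n = 8 : run 8,14 then divide at 20 to 5
        rw [fAlt_step_run f1 (f1-1) (by omega) total 8 (by norm_num) (by norm_num)
              (by norm_num) (by norm_num)]
        norm_num
        rw [fAlt_step_div (f1-1) (f1-2) (by omega) _ 20 (by norm_num) (by norm_num)
              (by norm_num)]
        norm_num
        rw [fAlt_small (f1-2) (f1-3) (by omega) _ 5 (by norm_num)]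
        rw [fRec_step_add f2 (f2-1) (by omega) 8 (by norm_num) (by norm_num) (by norm_num)
              (by norm_num)]
        norm_num
        rw [fRec_step_add (f2-1) (f2-2) (by omega) 14 (by norm_num) (by norm_num) (by norm_num)
              (by norm_num)]
        norm_num
        rw [fRec_step_div (f2-2) (f2-3) (by omega) 20 (by norm_num) (by norm_num) (by norm_num)
              (by norm_num)]
        norm_num
        rw [fRec_small (f2-3) (f2-4) (by omega) 5 (by norm_num)]
        ring
  | succ d ih =>
    intro n total f1 f2 hb hm hf1 hf2
    by_cases hsm : n ≤ 5 ^ d + 7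
    · exact ih n total f1 f2 hsm hm (by omega) (by omega)
    · have hP : (1:Int) ≤ 5 ^ d := one_le_pow₀ (by norm_num)
      have hb' : n ≤ 5 * 5 ^ d + 7 := by rw [pow_succ, mul_comm] at hb; exact hb
      have h9 : 9 ≤ n := by omega
      by_cases hr0 : n % 5 = 0
      · rw [fAlt_step_div f1 (f1-1) (by omega) total n (by omega) (by omega) hr0,
           fRec_step_div f2 (f2-1) (by omega) n (by omega) hm (by omega) hr0,
           ih (n/5+1) (total+n) (f1-1) (f2-1) (by omega) (by omega) (by omega) (by omega)]
        ring
      · by_cases hout : n + 6 * (5 - n % 5) > 1000000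
        · -- overshoot past 1000000 during the +6 run
          rw [fAlt_overshoot f1 (f1-1) (by omega) total n (by omega) (by omega) hr0 hout]
          have hj : (1000000 - n) / 6 + 1 = 1 ∨ (1000000 - n) / 6 + 1 = 2 ∨
              (1000000 - n) / 6 + 1 = 3 ∨ (1000000 - n) / 6 + 1 = 4 := by omega
          rcases hj with hj | hj | hj | hj
          · rw [fRec_step_add f2 (f2-1) (by omega) n (by omega) hm (by omega) hr0,
               fRec_big (f2-1) (f2-2) (by omega) (n+6) (by omega)]
            rw [hj]; omega
          · rw [fRec_step_add f2 (f2-1) (by omega) n (by omega) hm (by omega) hr0,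
               fRec_step_add (f2-1) (f2-2) (by omega) (n+6) (by omega) (by omega) (by omega)
                 (by omega),
               fRec_big (f2-2) (f2-3) (by omega) (n+6+6) (by omega)]
            rw [hj]; omega
          · rw [fRec_step_add f2 (f2-1) (by omega) n (by omega) hm (by omega) hr0,
               fRec_step_add (f2-1) (f2-2) (by omega) (n+6) (by omega) (by omega) (by omega)
                 (by omega),
               fRec_step_add (f2-2) (f2-3) (by omega) (n+6+6) (by omega) (by omega) (by omega)
                 (by omega),
               fRec_big (f2-3) (f2-4) (by omega) (n+6+6+6) (by omega)]
            rw [hj]; omega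
          · rw [fRec_step_add f2 (f2-1) (by omega) n (by omega) hm (by omega) hr0,
               fRec_step_add (f2-1) (f2-2) (by omega) (n+6) (by omega) (by omega) (by omega)
                 (by omega),
               fRec_step_add (f2-2) (f2-3) (by omega) (n+6+6) (by omega) (by omega) (by omega)
                 (by omega),
               fRec_step_add (f2-3) (f2-4) (by omega) (n+6+6+6) (by omega) (by omega) (by omega)
                 (by omega),
               fRec_big (f2-4) (f2-5) (by omega) (n+6+6+6+6) (by omega)]
            rw [hj]; omega
        · -- run stays in range: collapse it, then one division, then the IH
          rw [fAlt_step_run f1 (f1-1) (by omega) total n (by omega) (by omega) hr0 (by omega)]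
          rw [fAlt_step_div (f1-1) (f1-2) (by omega) _ (n + 6 * (5 - n % 5)) (by omega)
                (by omega) (by omega)]
          rw [ih ((n + 6 * (5 - n % 5))/5+1) _ (f1-2) (f2 - (5 - n % 5).toNat - 1)
                (by omega) (by omega) (by omega) (by omega)]
          have hr : n % 5 = 1 ∨ n % 5 = 2 ∨ n % 5 = 3 ∨ n % 5 = 4 := by omega
          rcases hr with hr | hr | hr | hr
          · rw [fRec_step_add f2 (f2-1) (by omega) n (by omega) hm (by omega) hr0,
               fRec_step_add (f2-1) (f2-2) (by omega) (n+6) (by omega) (by omega) (by omega)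
                 (by omega),
               fRec_step_add (f2-2) (f2-3) (by omega) (n+6+6) (by omega) (by omega) (by omega)
                 (by omega),
               fRec_step_add (f2-3) (f2-4) (by omega) (n+6+6+6) (by omega) (by omega) (by omega)
                 (by omega),
               fRec_step_div (f2-4) (f2-5) (by omega) (n+6+6+6+6) (by omega) (by omega)
                 (by omega) (by omega)]
            have e1 : (n+6+6+6+6)/5 = (n + 6 * (5 - n % 5))/5 := by rw [hr]; ring_nf
            have e2 : f2 - (5 - n % 5).toNat - 1 = f2 - 5 := by rw [hr]; rfl
            rw [e1, e2, hr]; omega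
          · rw [fRec_step_add f2 (f2-1) (by omega) n (by omega) hm (by omega) hr0,
               fRec_step_add (f2-1) (f2-2) (by omega) (n+6) (by omega) (by omega) (by omega)
                 (by omega),
               fRec_step_add (f2-2) (f2-3) (by omega) (n+6+6) (by omega) (by omega) (by omega)
                 (by omega),
               fRec_step_div (f2-3) (f2-4) (by omega) (n+6+6+6) (by omega) (by omega)
                 (by omega) (by omega)]
            have e1 : (n+6+6+6)/5 = (n + 6 * (5 - n % 5))/5 := by rw [hr]; ring_nf
            have e2 : f2 - (5 - n % 5).toNat - 1 = f2 - 4 := by rw [hr]; rfl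
            rw [e1, e2, hr]; omega
          · rw [fRec_step_add f2 (f2-1) (by omega) n (by omega) hm (by omega) hr0,
               fRec_step_add (f2-1) (f2-2) (by omega) (n+6) (by omega) (by omega) (by omega)
                 (by omega),
               fRec_step_div (f2-2) (f2-3) (by omega) (n+6+6) (by omega) (by omega)
                 (by omega) (by omega)]
            have e1 : (n+6+6)/5 = (n + 6 * (5 - n % 5))/5 := by rw [hr]; ring_nf
            have e2 : f2 - (5 - n % 5).toNat - 1 = f2 - 3 := by rw [hr]; rfl
            rw [e1, e2, hr]; omega
          · rw [fRec_step_add f2 (f2-1) (by omega) n (by omega) hm (by omega) hr0,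
               fRec_step_div (f2-1) (f2-2) (by omega) (n+6) (by omega) (by omega)
                 (by omega) (by omega)]
            have e1 : (n+6)/5 = (n + 6 * (5 - n % 5))/5 := by rw [hr]; ring_nf
            have e2 : f2 - (5 - n % 5).toNat - 1 = f2 - 2 := by rw [hr]; rfl
            rw [e1, e2, hr]; omega

-- ===== VERDICT (by name: the statement is the Claim_ definition above) =====
theorem f_spec : Claim_equal_f := by
  intro n _
  unfold Spec_f f f_alt
  by_cases h6 : n = 6
  · subst h6; rw [fRec_six 1000 999 rfl]; simp
  · have h6' : (n == 6) = false := by simp [h6]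
    rw [if_neg (by simp [h6])]
    by_cases hb : n > 1000000
    · rw [if_pos hb, fRec_big 1000 999 rfl _ hb]
    · rw [if_neg hb]
      by_cases hs : n ≤ 5
      · rw [if_pos hs, fRec_small 1000 999 rfl _ hs]
      · rw [if_neg hs]
        have := loop_eq_rec 9 n 0 1000 1000 (by norm_num; omega) (by omega) (by norm_num) (by norm_num)
        rw [this]; ring
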